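-- pv_equiv track=rewrite | github.com/PrzemekWasinski/ZombieIsland | server/scripts/3_clean_map.py | cleanup_edges
-- ===== SOURCE A (Python) =====
-- WATER = 0
--
-- SAND = 1
--
-- PLAINS = 2
--
-- FOREST = 3
--
-- SNOW = 4
--
-- def is_edge_tile(value):
--     if value >= 100:
--         last_two_digits = value % 100
--         return last_two_digits in [1, 3, 5, 7]
--     return False
--
-- def has_solid_block_neighbor(grid, row, col):
--     height = len(grid)
--     width = len(grid[0]) if height > 0 else 0
--
--     for dr in [-1, 0, 1]:
--         for dc in [-1, 0, 1]:
--             if dr == 0 and dc == 0: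
--                 continue
--             r, c = row + dr, col + dc
--             if 0 <= r < height and 0 <= c < width:
--                 tile = grid[r][c]
--                 if tile in [SAND, PLAINS, FOREST, SNOW]:
--                     return True
--     return False
--
-- def cleanup_edges(grid):
--     height = len(grid)
--     width = len(grid[0]) if height > 0 else 0
--     result = [row[:] for row in grid]
--
--     edges_removed = 0
--
--     for row in range(height):
--         for col in range(width):
--             tile = grid[row][col]
--
--
--             if is_edge_tile(tile):
--
--                 if not has_solid_block_neighbor(grid, row, col):
--                     result[row][col] = WATER
--                     edges_removed += 1
--
--     return result, edges_removed
-- ===== SOURCE B (Python) =====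
-- WATER = 0
-- SOLID = (1, 2, 3, 4)
-- OFFSETS = ((-1, -1), (-1, 0), (-1, 1), (0, -1), (0, 1), (1, -1), (1, 0), (1, 1))
--
--
-- def cleanup_edges(grid):
--     height = len(grid)
--     width = len(grid[0]) if height > 0 else 0
--     # pass 1: scatter — every solid cell marks its 8 in-bounds neighbors
--     solid_near = [[False] * width for _ in range(height)]
--     for r in range(height):
--         for c in range(width):
--             if grid[r][c] in SOLID:
--                 for dr, dc in OFFSETS:
--                     rr, cc = r + dr, c + dc
--                     if 0 <= rr < height and 0 <= cc < width:
--                         solid_near[rr][cc] = True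
--     # pass 2: an edge tile with no solid neighbor becomes water
--     result = [list(row) for row in grid]
--     edges_removed = 0
--     for r in range(height):
--         for c in range(width):
--             tile = grid[r][c]
--             if tile >= 100 and tile % 100 in (1, 3, 5, 7) and not solid_near[r][c]:
--                 result[r][c] = WATER
--                 edges_removed += 1
--     return result, edges_removed
-- ===== Notes on version B (the rewrite author's own statement) =====
-- stated objective: alternative
-- what changed: Replaces the per-cell gather (for every edge tile, rescan its 8 neighbors via has_solid_block_neighbor) by a two-pass scatter: one pass marks the neighbors of every solid cell in a boolean table, a second pass turns each unmarked edge tile to water; the per-cell neighbor scan disappears.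
import Mathlib
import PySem

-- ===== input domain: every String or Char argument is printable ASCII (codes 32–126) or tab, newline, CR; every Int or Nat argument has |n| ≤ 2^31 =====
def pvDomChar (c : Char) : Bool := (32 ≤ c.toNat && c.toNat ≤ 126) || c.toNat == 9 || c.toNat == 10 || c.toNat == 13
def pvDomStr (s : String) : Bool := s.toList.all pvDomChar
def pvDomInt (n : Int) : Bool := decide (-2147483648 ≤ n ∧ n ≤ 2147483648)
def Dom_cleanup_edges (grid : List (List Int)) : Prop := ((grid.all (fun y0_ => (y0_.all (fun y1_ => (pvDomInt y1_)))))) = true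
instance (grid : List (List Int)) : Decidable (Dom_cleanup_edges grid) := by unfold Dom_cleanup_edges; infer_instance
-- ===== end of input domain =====

-- B replaces A's per-edge-tile 8-neighbor rescan by a scatter pass into a boolean
-- neighbor table followed by one rewrite pass (alternative decomposition, same cost).

-- ===== PORT A =====
def is_edge_tile (value : Int) : Bool :=
  if 100 ≤ value then
    let last_two_digits := PySem.Int.mod value 100
    [(1 : Int), 3, 5, 7].contains last_two_digits
  else false

def has_solid_block_neighbor (grid : List (List Int)) (row col : Int) : Bool :=
  let height : Int := grid.length
  let width : Int := if 0 < height then ((grid.headD []).length : Int) else 0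
  -- nested 'for dr / for dc' with early 'return True' = any/any
  [(-1 : Int), 0, 1].any fun dr =>
    [(-1 : Int), 0, 1].any fun dc =>
      if dr = 0 ∧ dc = 0 then false
      else
        let r := row + dr
        let c := col + dc
        if 0 ≤ r ∧ r < height ∧ 0 ≤ c ∧ c < width then
          let tile := PySem.List.pyGetD (PySem.List.pyGetD grid r []) c 0
          [(1 : Int), 2, 3, 4].contains tile
        else false

def cleanup_edges (grid : List (List Int)) : List (List Int) × Int :=
  let height : Int := grid.length
  let width : Int := if 0 < height then ((grid.headD []).length : Int) else 0
  let result := grid.map fun row => PySem.List.slice row none none   -- row[:]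
  (PySem.List.pyRange 0 height 1).foldl (fun st row =>
    (PySem.List.pyRange 0 width 1).foldl (fun st col =>
      let tile := PySem.List.pyGetD (PySem.List.pyGetD grid row []) col 0
      if is_edge_tile tile then
        if !(has_solid_block_neighbor grid row col) then
          (PySem.List.pySetD st.1 row
             (PySem.List.pySetD (PySem.List.pyGetD st.1 row []) col 0), st.2 + 1)
        else st
      else st) st) (result, (0 : Int))

-- ===== PORT B =====
def pyOffsets : List (Int × Int) := [(-1,-1),(-1,0),(-1,1),(0,-1),(0,1),(1,-1),(1,0),(1,1)]

def markNeighbors (height width : Int) (t : List (List Bool)) (r c : Int) : List (List Bool) :=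
  pyOffsets.foldl (fun t d =>
    let rr := r + d.1
    let cc := c + d.2
    if 0 ≤ rr ∧ rr < height ∧ 0 ≤ cc ∧ cc < width then
      PySem.List.pySetD t rr (PySem.List.pySetD (PySem.List.pyGetD t rr []) cc true)
    else t) t

def buildSolidNear (grid : List (List Int)) (height width : Int) : List (List Bool) :=
  (PySem.List.pyRange 0 height 1).foldl (fun t r =>
    (PySem.List.pyRange 0 width 1).foldl (fun t c =>
      if [(1 : Int), 2, 3, 4].contains (PySem.List.pyGetD (PySem.List.pyGetD grid r []) c 0) then
        markNeighbors height width t r c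
      else t) t)
    (List.replicate height.toNat (List.replicate width.toNat false))

def cleanup_edges_alt (grid : List (List Int)) : List (List Int) × Int :=
  let height : Int := grid.length
  let width : Int := if 0 < height then ((grid.headD []).length : Int) else 0
  let near := buildSolidNear grid height width
  -- result = [list(row) for row in grid]  (a copy: value-equal to row)
  (PySem.List.pyRange 0 height 1).foldl (fun st r =>
    (PySem.List.pyRange 0 width 1).foldl (fun st c =>
      let tile := PySem.List.pyGetD (PySem.List.pyGetD grid r []) c 0
      if (decide (100 ≤ tile) && [(1 : Int), 3, 5, 7].contains (PySem.Int.mod tile 100)) &&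
         !(PySem.List.pyGetD (PySem.List.pyGetD near r []) c false) then
        (PySem.List.pySetD st.1 r
           (PySem.List.pySetD (PySem.List.pyGetD st.1 r []) c 0), st.2 + 1)
      else st) st) (grid.map (fun row => row), (0 : Int))

-- ===== PRECONDITION & SPEC =====
-- Pre_ excludes exactly the grids on which the Python A raises IndexError: some row is
-- shorter than row 0 (the loops index every row at all columns 0..len(grid[0])-1).
def Pre_cleanup_edges (grid : List (List Int)) : Prop :=
  ∀ row ∈ grid, (grid.headD []).length ≤ row.length
instance (grid : List (List Int)) : Decidable (Pre_cleanup_edges grid) := by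
  unfold Pre_cleanup_edges; infer_instance

def pvWitness_cleanup_edges : List (List Int) := [[101, 0], [0, 2]]

def Spec_cleanup_edges (grid : List (List Int)) (out : List (List Int) × Int) : Prop := out = cleanup_edges_alt grid
instance (grid : List (List Int)) (out : List (List Int) × Int) : Decidable (Spec_cleanup_edges grid out) := by unfold Spec_cleanup_edges; infer_instance

-- ===== CLAIM (what is proved, stated in full; the proofs are below) =====
def Claim_equal_cleanup_edges : Prop := ∀ (grid : List (List Int)), Dom_cleanup_edges grid → Pre_cleanup_edges grid → Spec_cleanup_edges grid (cleanup_edges grid)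

-- ===== LEMMAS AND PROOFS =====

/-- Table lookup used in the proofs. -/
def get2 (t : List (List Bool)) (r c : Nat) : Bool := (t.getD r []).getD c false

/-- The table stays a h×w rectangle. -/
def Shape (t : List (List Bool)) (h w : Nat) : Prop :=
  t.length = h ∧ ∀ row ∈ t, row.length = w

lemma getD_set {α : Type} (t : List α) (a r : Nat) (v d : α) :
    (t.set a v).getD r d = if a = r ∧ a < t.length then v else t.getD r d := by
  simp [List.getD_eq_getElem?_getD, List.getElem?_set]
  split_ifs with h1 h2 h3 <;> simp_all <;> omega

lemma mark_aux (h w : Nat) (r c : Nat) (hr : r < h) (hc : c < w) (i j : Int)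
    (ds : List (Int × Int)) (t : List (List Bool)) (ht : Shape t h w) :
    Shape (ds.foldl (fun t d =>
      let rr := i + d.1
      let cc := j + d.2
      if 0 ≤ rr ∧ rr < (h : Int) ∧ 0 ≤ cc ∧ cc < (w : Int) then
        PySem.List.pySetD t rr (PySem.List.pySetD (PySem.List.pyGetD t rr []) cc true)
      else t) t) h w ∧
    get2 (ds.foldl (fun t d =>
      let rr := i + d.1
      let cc := j + d.2
      if 0 ≤ rr ∧ rr < (h : Int) ∧ 0 ≤ cc ∧ cc < (w : Int) then
        PySem.List.pySetD t rr (PySem.List.pySetD (PySem.List.pyGetD t rr []) cc true)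
      else t) t) r c
      = (get2 t r c || ds.any (fun d => decide (i + d.1 = (r : Int)) && decide (j + d.2 = (c : Int)))) := by
  induction ds generalizing t with
  | nil => simpa using ht
  | cons d ds ih =>
    simp only [List.foldl_cons, List.any_cons]
    by_cases hb : 0 ≤ i + d.1 ∧ i + d.1 < (h : Int) ∧ 0 ≤ j + d.2 ∧ j + d.2 < (w : Int)
    · -- in-bounds: the step is a set
      rw [if_pos hb]
      obtain ⟨h1, h2, h3, h4⟩ := hb
      rw [PySem.List.pySetD_of_nonneg _ _ h1, PySem.List.pyGetD_of_nonneg _ _ h1,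
          PySem.List.pySetD_of_nonneg _ _ h3]
      have hL : t.length = h := ht.1
      have hshape : Shape (t.set (i + d.1).toNat (((t.getD (i + d.1).toNat []).set (j + d.2).toNat true))) h w := by
        constructor
        · simpa using ht.1
        · intro row hrow
          rcases List.mem_or_eq_of_mem_set hrow with hm | he
          · exact ht.2 row hm
          · subst he
            simp only [List.length_set]
            have hL : t.length = h := ht.1
            have hlt : (i + d.1).toNat < t.length := by omega
            have hm2 : t.getD (i + d.1).toNat [] ∈ t := by
              rw [List.getD_eq_getElem t [] hlt]; exact List.getElem_mem hlt
            exact ht.2 _ hm2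
      obtain ⟨hs, hg⟩ := ih _ hshape
      refine ⟨hs, ?_⟩
      rw [hg]
      have hrow : get2 (t.set (i + d.1).toNat (((t.getD (i + d.1).toNat []).set (j + d.2).toNat true))) r c
          = (get2 t r c || (decide (i + d.1 = (r : Int)) && decide (j + d.2 = (c : Int)))) := by
        unfold get2
        rw [getD_set]
        by_cases hre : (i + d.1).toNat = r ∧ (i + d.1).toNat < t.length
        · rw [if_pos hre]
          rw [getD_set]
          have hlen : (t.getD (i + d.1).toNat []).length = w := by
            have hlt : (i + d.1).toNat < t.length := hre.2
            have hm2 : t.getD (i + d.1).toNat [] ∈ t := by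
              rw [List.getD_eq_getElem t [] hlt]; exact List.getElem_mem hlt
            exact ht.2 _ hm2
          by_cases hce : (j + d.2).toNat = c
          · have : (j + d.2).toNat < (t.getD (i + d.1).toNat []).length := by omega
            rw [if_pos ⟨hce, this⟩]
            have e1 : i + d.1 = (r : Int) := by omega
            have e2 : j + d.2 = (c : Int) := by omega
            simp [e1, e2]
          · rw [if_neg (by tauto)]
            have e2 : ¬ (j + d.2 = (c : Int)) := by omega
            simp [e2, hre.1]
        · rw [if_neg hre]
          have hL : t.length = h := ht.1
          have : ¬ (i + d.1 = (r : Int)) := by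
            intro he
            exact hre ⟨by omega, by omega⟩
          simp [this]
      rw [hrow]
      cases get2 t r c <;> simp
    · rw [if_neg hb]
      obtain ⟨hs, hg⟩ := ih t ht
      refine ⟨hs, ?_⟩
      rw [hg]
      have : ¬ (i + d.1 = (r : Int) ∧ j + d.2 = (c : Int)) := by
        intro ⟨e1, e2⟩; exact hb ⟨by omega, by omega, by omega, by omega⟩
      have hz : (decide (i + d.1 = (r : Int)) && decide (j + d.2 = (c : Int))) = false := by
        simp only [Bool.and_eq_false_iff, decide_eq_false_iff_not]
        tauto
      rw [hz]
      simp

def readG (grid : List (List Int)) (i j : Int) : Int :=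
  PySem.List.pyGetD (PySem.List.pyGetD grid i []) j 0

def nbrB (i j : Int) (r c : Nat) : Bool :=
  pyOffsets.any (fun d => decide (i + d.1 = (r : Int)) && decide (j + d.2 = (c : Int)))

lemma mark_spec (h w : Nat) (r c : Nat) (hr : r < h) (hc : c < w) (i j : Int)
    (t : List (List Bool)) (ht : Shape t h w) :
    Shape (markNeighbors (h : Int) (w : Int) t i j) h w ∧
    get2 (markNeighbors (h : Int) (w : Int) t i j) r c = (get2 t r c || nbrB i j r c) := by
  exact mark_aux h w r c hr hc i j pyOffsets t ht

lemma inner_aux (grid : List (List Int)) (h w : Nat) (r c : Nat) (hr : r < h) (hc : c < w)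
    (i : Int) (cs : List Int) (t : List (List Bool)) (ht : Shape t h w) :
    Shape (cs.foldl (fun t c' =>
      if [(1 : Int), 2, 3, 4].contains (PySem.List.pyGetD (PySem.List.pyGetD grid i []) c' 0) then
        markNeighbors (h : Int) (w : Int) t i c'
      else t) t) h w ∧
    get2 (cs.foldl (fun t c' =>
      if [(1 : Int), 2, 3, 4].contains (PySem.List.pyGetD (PySem.List.pyGetD grid i []) c' 0) then
        markNeighbors (h : Int) (w : Int) t i c'
      else t) t) r c
    = (get2 t r c || cs.any (fun j => [(1 : Int), 2, 3, 4].contains (readG grid i j) && nbrB i j r c)) := by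
  induction cs generalizing t with
  | nil => simpa using ht
  | cons j cs ih =>
    simp only [List.foldl_cons, List.any_cons]
    by_cases hs : [(1 : Int), 2, 3, 4].contains (PySem.List.pyGetD (PySem.List.pyGetD grid i []) j 0) = true
    · rw [if_pos hs]
      obtain ⟨hsh, hg⟩ := mark_spec h w r c hr hc i j t ht
      obtain ⟨hsh2, hg2⟩ := ih _ hsh
      refine ⟨hsh2, ?_⟩
      rw [hg2, hg]
      have : [(1 : Int), 2, 3, 4].contains (readG grid i j) = true := hs
      rw [this]
      cases get2 t r c <;> simp
    · rw [if_neg hs]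
      obtain ⟨hsh2, hg2⟩ := ih t ht
      refine ⟨hsh2, ?_⟩
      rw [hg2]
      have : [(1 : Int), 2, 3, 4].contains (readG grid i j) = false := by
        simpa [readG] using hs
      rw [this]
      simp

lemma outer_aux (grid : List (List Int)) (h w : Nat) (r c : Nat) (hr : r < h) (hc : c < w)
    (wI : Int) (rs : List Int) (t : List (List Bool)) (ht : Shape t h w) :
    Shape (rs.foldl (fun t i =>
      (PySem.List.pyRange 0 wI 1).foldl (fun t c' =>
        if [(1 : Int), 2, 3, 4].contains (PySem.List.pyGetD (PySem.List.pyGetD grid i []) c' 0) then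
          markNeighbors (h : Int) (w : Int) t i c'
        else t) t) t) h w ∧
    get2 (rs.foldl (fun t i =>
      (PySem.List.pyRange 0 wI 1).foldl (fun t c' =>
        if [(1 : Int), 2, 3, 4].contains (PySem.List.pyGetD (PySem.List.pyGetD grid i []) c' 0) then
          markNeighbors (h : Int) (w : Int) t i c'
        else t) t) t) r c
    = (get2 t r c || rs.any (fun i => (PySem.List.pyRange 0 wI 1).any
        (fun j => [(1 : Int), 2, 3, 4].contains (readG grid i j) && nbrB i j r c))) := by
  induction rs generalizing t with
  | nil => simpa using ht
  | cons i rs ih =>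
    simp only [List.foldl_cons, List.any_cons]
    obtain ⟨hsh, hg⟩ := inner_aux grid h w r c hr hc i (PySem.List.pyRange 0 wI 1) t ht
    obtain ⟨hsh2, hg2⟩ := ih _ hsh
    refine ⟨hsh2, ?_⟩
    rw [hg2, hg]
    cases get2 t r c <;> simp

lemma build_get (grid : List (List Int)) (h w : Nat) (r c : Nat) (hr : r < h) (hc : c < w) :
    get2 (buildSolidNear grid (h : Int) (w : Int)) r c
    = (PySem.List.pyRange 0 (h : Int) 1).any (fun i => (PySem.List.pyRange 0 (w : Int) 1).any
        (fun j => [(1 : Int), 2, 3, 4].contains (readG grid i j) && nbrB i j r c)) := by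
  have hinit : Shape (List.replicate ((h : Int)).toNat (List.replicate ((w : Int)).toNat false)) h w := by
    constructor
    · simp
    · intro row hrow
      have := List.eq_of_mem_replicate hrow
      simp [this]
  obtain ⟨_, hg⟩ := outer_aux grid h w r c hr hc (w : Int) (PySem.List.pyRange 0 (h : Int) 1) _ hinit
  rw [buildSolidNear, hg]
  have : get2 (List.replicate ((h : Int)).toNat (List.replicate ((w : Int)).toNat false)) r c = false := by
    unfold get2
    simp [List.getD_eq_getElem?_getD, hr, hc]
  rw [this]
  simp

lemma nbrB_iff (i j : Int) (r c : Nat) :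
    nbrB i j r c = true ↔
      (i - (r : Int) ≤ 1 ∧ (r : Int) - i ≤ 1 ∧ j - (c : Int) ≤ 1 ∧ (c : Int) - j ≤ 1 ∧
        ¬(i = (r : Int) ∧ j = (c : Int))) := by
  simp [nbrB, pyOffsets]
  omega

lemma scatter_eq_gather (grid : List (List Int)) (hg : grid ≠ [])
    (r c : Nat) (_hr : r < grid.length) (_hc : c < (grid.headD []).length) :
    ((PySem.List.pyRange 0 (grid.length : Int) 1).any (fun i =>
      (PySem.List.pyRange 0 ((grid.headD []).length : Int) 1).any
        (fun j => [(1 : Int), 2, 3, 4].contains (readG grid i j) && nbrB i j r c)))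
    = has_solid_block_neighbor grid (r : Int) (c : Int) := by
  have hh : (0 : Int) < (grid.length : Int) := by
    have : 0 < grid.length := List.length_pos_iff.mpr hg
    exact_mod_cast this
  rw [Bool.eq_iff_iff]
  simp only [List.any_eq_true, PySem.List.mem_pyRange_one, Bool.and_eq_true]
  constructor
  · rintro ⟨i, ⟨hi0, hih⟩, j, ⟨hj0, hjw⟩, hsolid, hnbr⟩
    rw [nbrB_iff] at hnbr
    obtain ⟨b1, b2, b3, b4, bne⟩ := hnbr
    rw [has_solid_block_neighbor]
    simp only [List.any_eq_true, List.mem_cons, List.not_mem_nil, or_false]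
    refine ⟨i - r, by omega, j - c, by omega, ?_⟩
    rw [if_neg (by omega)]
    rw [if_pos (by simp only [if_pos hh]; constructor <;> omega)]
    have e1 : (r : Int) + (i - (r : Int)) = i := by ring
    have e2 : (c : Int) + (j - (c : Int)) = j := by ring
    rw [e1, e2]
    exact hsolid
  · intro hA
    rw [has_solid_block_neighbor] at hA
    simp only [List.any_eq_true, List.mem_cons, List.not_mem_nil, or_false] at hA
    obtain ⟨dr, hdr, dc, hdc, hbody⟩ := hA
    by_cases hz : dr = 0 ∧ dc = 0
    · rw [if_pos hz] at hbody; exact absurd hbody (by simp)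
    · rw [if_neg hz] at hbody
      by_cases hb : 0 ≤ (r : Int) + dr ∧ (r : Int) + dr < (grid.length : Int) ∧
          0 ≤ (c : Int) + dc ∧ (c : Int) + dc < (if 0 < (grid.length : Int) then ((grid.headD []).length : Int) else 0)
      · rw [if_pos hb] at hbody
        obtain ⟨c1, c2, c3, c4⟩ := hb
        rw [if_pos hh] at c4
        refine ⟨(r : Int) + dr, ⟨c1, c2⟩, (c : Int) + dc, ⟨c3, c4⟩, hbody, ?_⟩
        rw [nbrB_iff]
        rcases hdr with rfl | rfl | rfl <;> rcases hdc with rfl | rfl | rfl <;>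
          first
            | exact absurd ⟨rfl, rfl⟩ hz
            | (refine ⟨by omega, by omega, by omega, by omega, ?_⟩; omega)
      · rw [if_neg hb] at hbody; exact absurd hbody (by simp)

lemma is_edge_eq (v : Int) :
    is_edge_tile v = (decide (100 ≤ v) && [(1 : Int), 3, 5, 7].contains (PySem.Int.mod v 100)) := by
  rw [is_edge_tile]
  by_cases h : 100 ≤ v <;> simp [h]

-- ===== VERDICT (by name: the statement is the Claim_ definition above) =====
theorem cleanup_edges_spec : Claim_equal_cleanup_edges := by
  intro grid _ _
  unfold Spec_cleanup_edges
  by_cases hg : grid = []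
  · subst hg; decide
  · have hpos : 0 < grid.length := List.length_pos_iff.mpr hg
    have hh : (0 : Int) < (grid.length : Int) := by exact_mod_cast hpos
    unfold cleanup_edges cleanup_edges_alt
    simp only [if_pos hh, PySem.List.slice_none_none, List.map_id']
    apply PySem.List.foldl_congr_mem'
    intro row hrow
    rw [PySem.List.mem_pyRange_one] at hrow
    intro st
    apply PySem.List.foldl_congr_mem'
    intro col hcol
    rw [PySem.List.mem_pyRange_one] at hcol
    intro st'
    obtain ⟨hr0, hrh⟩ := hrow
    obtain ⟨hc0, hcw⟩ := hcol
    have er : ((row.toNat : Nat) : Int) = row := Int.toNat_of_nonneg hr0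
    have ec : ((col.toNat : Nat) : Int) = col := Int.toNat_of_nonneg hc0
    rw [← er, ← ec]
    have hrl : row.toNat < grid.length := by omega
    have hcl : col.toNat < (grid.headD []).length := by omega
    have hnear : PySem.List.pyGetD (PySem.List.pyGetD
          (buildSolidNear grid (grid.length : Int) ((grid.headD []).length : Int))
          ((row.toNat : Nat) : Int) []) ((col.toNat : Nat) : Int) false
        = has_solid_block_neighbor grid ((row.toNat : Nat) : Int) ((col.toNat : Nat) : Int) := by
      rw [PySem.List.pyGetD_natCast, PySem.List.pyGetD_natCast]
      have hget : ((buildSolidNear grid (grid.length : Int) ((grid.headD []).length : Int)).getD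
          row.toNat []).getD col.toNat false
          = get2 (buildSolidNear grid (grid.length : Int) ((grid.headD []).length : Int))
              row.toNat col.toNat := rfl
      rw [hget, build_get grid grid.length (grid.headD []).length row.toNat col.toNat hrl hcl,
          scatter_eq_gather grid hg row.toNat col.toNat hrl hcl]
    rw [hnear, is_edge_eq]
    cases has_solid_block_neighbor grid ((row.toNat : Nat) : Int) ((col.toNat : Nat) : Int) <;>
      cases (decide (100 ≤ PySem.List.pyGetD (PySem.List.pyGetD grid ((row.toNat : Nat) : Int) [])
          ((col.toNat : Nat) : Int) 0) &&
        [(1 : Int), 3, 5, 7].contains (PySem.Int.mod (PySem.List.pyGetD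
          (PySem.List.pyGetD grid ((row.toNat : Nat) : Int) []) ((col.toNat : Nat) : Int) 0) 100)) <;>
      simp
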